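-- pv_equiv track=rewrite | github.com/AndyOJuliao/analise-sentimento | project.py | marque_negacao
-- ===== SOURCE A (Python) =====
-- def marque_negacao(texto):
--     negacoes = ['nao', 'not', 'não']
--     negacao_detectada = False
--     resultado = []
--     palavras = texto.split()
--     for p in palavras:
--         p = p.lower()
--         if negacao_detectada == True:
--             p = p + '_NEG'
--         if p in negacoes:
--             negacao_detectada = True
--         resultado.append(p)
--     return (" ".join(resultado))
-- ===== SOURCE B (Python) =====
-- def marque_negacao(texto):
--     palavras = [p.lower() for p in texto.split()]
--     pivot = next((i for i, p in enumerate(palavras) if p in ('nao', 'not', 'não')),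
--                  len(palavras))
--     return " ".join(palavras[:pivot + 1] + [p + '_NEG' for p in palavras[pivot + 1:]])
-- ===== Notes on version B (the rewrite author's own statement) =====
-- stated objective: simpler
-- what changed: Replaces the stateful per-word negation flag loop with an explicit pivot (index of the first negation word, found via next/enumerate) and two slice-based transforms: words up to the pivot unchanged, words after it suffixed with _NEG.
import Mathlib
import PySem

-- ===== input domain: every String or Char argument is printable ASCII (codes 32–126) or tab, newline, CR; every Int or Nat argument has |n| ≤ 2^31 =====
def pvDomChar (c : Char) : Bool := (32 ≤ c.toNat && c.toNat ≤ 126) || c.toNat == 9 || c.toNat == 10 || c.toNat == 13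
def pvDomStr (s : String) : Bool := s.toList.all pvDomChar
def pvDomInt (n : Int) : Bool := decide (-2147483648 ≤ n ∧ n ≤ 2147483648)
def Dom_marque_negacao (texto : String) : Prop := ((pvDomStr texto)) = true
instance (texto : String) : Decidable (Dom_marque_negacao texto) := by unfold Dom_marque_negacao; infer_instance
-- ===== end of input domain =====

-- B replaces A's stateful per-word negation flag with an explicit pivot index plus
-- two slice-based transforms (simpler decomposition; same output, return value only).

-- ===== PORT A =====
-- the negation word list (strings as List Char; 'não' is non-ASCII, kept verbatim)
def pvNegacoes : List (List Char) := [['n','a','o'], ['n','o','t'], ['n','ã','o']]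

-- one iteration of A's loop: state = (negacao_detectada, resultado); p is lowered,
-- suffixed if the flag is set, then may set the flag, and is appended
def pvStepA (st : Bool × List (List Char)) (w : String) : Bool × List (List Char) :=
  let p := PySem.Chars.lower w.toList
  let p := if st.1 then p ++ ['_','N','E','G'] else p
  (st.1 || decide (p ∈ pvNegacoes), st.2 ++ [p])

def marque_negacao (texto : String) : String :=
  let r := (PySem.Str.split₀ texto).foldl pvStepA (false, [])
  String.mk (PySem.Chars.join [' '] r.2)

-- ===== PORT B =====
def marque_negacao_alt (texto : String) : String :=
  let palavras : List (List Char) :=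
    (PySem.Str.split₀ texto).map (fun w => PySem.Chars.lower w.toList)
  -- next((i for i, p in enumerate(palavras) if p in (...)), len(palavras))
  let pivot : Nat :=
    ((palavras.findIdx? (fun p => decide (p ∈ pvNegacoes))).getD palavras.length)
  let out :=
    PySem.List.slice palavras none (some ((pivot : Int) + 1)) ++
      (PySem.List.slice palavras (some ((pivot : Int) + 1)) none).map
        (fun p => p ++ ['_','N','E','G'])
  String.mk (PySem.Chars.join [' '] out)

-- ===== PRECONDITION & SPEC =====
def Spec_marque_negacao (texto : String) (out : String) : Prop := out = marque_negacao_alt texto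
instance (texto : String) (out : String) : Decidable (Spec_marque_negacao texto out) := by unfold Spec_marque_negacao; infer_instance

-- ===== CLAIM (what is proved, stated in full; the proofs are below) =====
def Claim_equal_marque_negacao : Prop := ∀ (texto : String), Dom_marque_negacao texto → Spec_marque_negacao texto (marque_negacao texto)

-- ===== LEMMAS AND PROOFS =====

-- A's per-word step, on the already-lowered word
def pvStepL (st : Bool × List (List Char)) (p : List Char) : Bool × List (List Char) :=
  let p := if st.1 then p ++ ['_','N','E','G'] else p
  (st.1 || decide (p ∈ pvNegacoes), st.2 ++ [p])

-- once the flag is set, every remaining word is suffixed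
theorem pvFold_true (ls : List (List Char)) (acc : List (List Char)) :
    (ls.foldl pvStepL (true, acc)).2 = acc ++ ls.map (· ++ ['_','N','E','G']) := by
  induction ls generalizing acc with
  | nil => simp
  | cons l ls ih =>
      simp only [List.foldl_cons, List.map_cons]
      rw [show pvStepL (true, acc) l = (true, acc ++ [l ++ ['_','N','E','G']]) by
            simp [pvStepL, pvNegacoes]]
      rw [ih]; simp

theorem pvGetD_map_succ (o : Option Nat) (n : Nat) :
    ((o.map (· + 1)).getD (n + 1)) = (o.getD n) + 1 := by cases o <;> rfl

-- before the flag is set, the fold produces the pivot-split form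
theorem pvFold_false (ls : List (List Char)) (acc : List (List Char)) :
    (ls.foldl pvStepL (false, acc)).2 =
      acc ++ (ls.take (((ls.findIdx? (fun p => decide (p ∈ pvNegacoes))).getD ls.length) + 1)
        ++ (ls.drop (((ls.findIdx? (fun p => decide (p ∈ pvNegacoes))).getD ls.length) + 1)).map
             (· ++ ['_','N','E','G'])) := by
  induction ls generalizing acc with
  | nil => simp
  | cons l ls ih =>
      by_cases hl : l ∈ pvNegacoes
      · simp only [List.foldl_cons, List.findIdx?_cons, hl, decide_true]
        rw [show pvStepL (false, acc) l = (true, acc ++ [l]) by simp [pvStepL, hl]]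
        rw [pvFold_true]
        simp
      · simp only [List.foldl_cons, List.findIdx?_cons, hl, decide_false,
          Bool.false_eq_true, if_false, List.length_cons]
        rw [show pvStepL (false, acc) l = (false, acc ++ [l]) by simp [pvStepL, hl]]
        rw [ih, pvGetD_map_succ]
        simp

theorem marque_negacao_eq (texto : String) :
    marque_negacao texto = marque_negacao_alt texto := by
  have hA : marque_negacao texto = String.mk (PySem.Chars.join [' ']
      (((PySem.Str.split₀ texto).map (fun w => PySem.Chars.lower w.toList)).foldl
        pvStepL (false, [])).2) := by
    simp only [marque_negacao, List.foldl_map]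
    rfl
  set ls := (PySem.Str.split₀ texto).map (fun w => PySem.Chars.lower w.toList) with hls
  set k : Nat := ((ls.findIdx? (fun p => decide (p ∈ pvNegacoes))).getD ls.length) with hk
  have h1 : PySem.List.slice ls none (some ((k : Int) + 1)) = ls.take (k + 1) := by
    have := PySem.List.slice_to_natCast ls (k + 1)
    simpa using this
  have h2 : PySem.List.slice ls (some ((k : Int) + 1)) none = ls.drop (k + 1) := by
    have := PySem.List.slice_from_natCast ls (k + 1)
    simpa using this
  rw [hA, pvFold_false]
  simp only [marque_negacao_alt, ← hls, ← hk, h1, h2]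
  simp

-- ===== VERDICT (by name: the statement is the Claim_ definition above) =====
theorem marque_negacao_spec : Claim_equal_marque_negacao := by
  intro texto _
  exact marque_negacao_eq texto
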